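-- pv_equiv track=rewrite | github.com/jalmx/cards-electronics-python-21 | scripts/web.py | generate_list_cap
-- ===== SOURCE A (Python) =====
-- def generate_list_cap(list_files: []) -> dict:
--     list_complet = {}
--
--     for file_html in list_files:
--         init = file_html.split("_")[0]
--         number = 0
--         if init.isnumeric():
--             number = int(init)
--             number = int(str(number)[0])
--
--         if list_complet.get(number) is None:
--             list_complet[number] = [file_html]
--         else:
--             list_complet.get(number).append(file_html)
--
--     for key in list_complet:
--         list_complet[key] = sorted(list_complet.get(key))
--         #list_complet.get(key).sort()
--
--     return list_complet
-- ===== SOURCE B (Python) =====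
-- def generate_list_cap(list_files: []) -> dict:
--     def key(file_html):
--         init = file_html.split("_")[0]
--         if init.isnumeric():
--             return int(str(int(init))[0])
--         return 0
--
--     keys = [key(f) for f in list_files]
--     return {k: sorted([f for f in list_files if key(f) == k])
--             for k in dict.fromkeys(keys)}
-- ===== Notes on version B (the rewrite author's own statement) =====
-- stated objective: alternative
-- what changed: Replaces A's incremental build-dict-then-sort-each-bucket loop with a declarative two-phase form: compute the key list once, dedup it for the key order, and build the result as a comprehension that filters-and-sorts the matching files per key.
import Mathlib
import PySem

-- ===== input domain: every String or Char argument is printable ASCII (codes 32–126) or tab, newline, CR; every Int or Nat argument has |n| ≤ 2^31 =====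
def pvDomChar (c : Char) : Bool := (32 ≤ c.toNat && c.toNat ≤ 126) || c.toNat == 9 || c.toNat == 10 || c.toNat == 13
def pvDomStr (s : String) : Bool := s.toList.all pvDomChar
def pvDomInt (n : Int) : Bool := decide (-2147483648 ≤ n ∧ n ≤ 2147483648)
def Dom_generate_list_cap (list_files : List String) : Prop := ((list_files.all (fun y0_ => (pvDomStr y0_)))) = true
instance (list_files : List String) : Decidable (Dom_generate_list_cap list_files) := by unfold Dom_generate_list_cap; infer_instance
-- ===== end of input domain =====

-- B replaces A's incremental build-dict-then-sort-each-bucket loop by a declarative form: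
-- dedup the key list once, then filter-and-sort the matching files per key (objective: alternative, same cost class).

-- ===== PORT A =====
def generate_list_cap (list_files : List String) : List (Int × List String) :=
  let list_complet : PySem.Dict Int (List String) :=
    list_files.foldl (fun list_complet file_html =>
      -- init = file_html.split("_")[0]; split with the nonempty separator "_" is never none and
      -- never returns [], so the getD/headD defaults are dead
      let init := ((PySem.Str.split? file_html "_").getD []).headD ""
      let number : Int :=
        -- isnumeric agrees with isdigit on the printable-ASCII domain (PySem.Str.strIsdigit is exact there)
        if PySem.Str.strIsdigit init then
          -- int(init): parses since init is a nonempty all-digit string, so getD 0 is never taken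
          let n := (PySem.Int.ofStr? init).getD 0
          -- int(str(n)[0]): str(n) is nonempty and its first char is a digit, so both defaults are dead
          (PySem.Int.ofStr? (String.ofList [(PySem.Int.toStr n).toList.headD '0'])).getD 0
        else 0
      if list_complet.get? number = none then
        list_complet.insert number [file_html]
      else
        -- list_complet.get(number).append(file_html): in-place append to the stored list
        list_complet.modify number [] (fun v => v ++ [file_html])
    ) PySem.Dict.empty
  -- 'for key in list_complet: list_complet[key] = sorted(...)': reassigning each existing key keeps
  -- its position, so the loop maps sorted over the items in order
  list_complet.items.map (fun p => (p.1, PySem.List.sorted p.2 (fun x => x) false))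

-- ===== PORT B =====
-- helper key(file_html) of Source B
def pvKey (file_html : String) : Int :=
  let init := ((PySem.Str.split? file_html "_").getD []).headD ""
  if PySem.Str.strIsdigit init then
    let n := (PySem.Int.ofStr? init).getD 0
    (PySem.Int.ofStr? (String.ofList [(PySem.Int.toStr n).toList.headD '0'])).getD 0
  else 0

def generate_list_cap_alt (list_files : List String) : List (Int × List String) :=
  let keys := list_files.map pvKey
  -- {k: sorted([f for f in list_files if key(f) == k]) for k in dict.fromkeys(keys)}
  (PySem.List.dedup keys).map (fun k =>
    (k, PySem.List.sorted (list_files.filter (fun f => pvKey f == k)) (fun x => x) false))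

-- ===== PRECONDITION & SPEC =====
def Spec_generate_list_cap (list_files : List String) (out : List (Int × List String)) : Prop := out = generate_list_cap_alt list_files
instance (list_files : List String) (out : List (Int × List String)) : Decidable (Spec_generate_list_cap list_files out) := by unfold Spec_generate_list_cap; infer_instance

-- ===== CLAIM (what is proved, stated in full; the proofs are below) =====
def Claim_equal_generate_list_cap : Prop := ∀ (list_files : List String), Dom_generate_list_cap list_files → Spec_generate_list_cap list_files (generate_list_cap list_files)

-- ===== LEMMAS AND PROOFS =====

-- A's branch (insert when the key is absent, append when present) is exactly Dict.modify with default []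
theorem pv_step_eq_modify (d : PySem.Dict Int (List String)) (k : Int) (f : String) :
    (if d.get? k = none then d.insert k [f] else d.modify k [] (fun v => v ++ [f]))
      = d.modify k [] (fun v => v ++ [f]) := by
  by_cases h : d.get? k = none
  · simp [h, PySem.Dict.modify, PySem.Dict.getD_eq_get?_getD]
  · simp [h]

-- invariant of the grouping fold: the value stored at c is the old value plus the matching files in order
theorem pv_getD_fold (l : List String) (d : PySem.Dict Int (List String)) (c : Int) :
    (l.foldl (fun d f => d.modify (pvKey f) [] (fun v => v ++ [f])) d).getD c []
      = d.getD c [] ++ l.filter (fun f => pvKey f == c) := by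
  induction l generalizing d with
  | nil => simp
  | cons f l ih =>
    simp only [List.foldl_cons, ih, List.filter_cons]
    by_cases h : pvKey f = c
    · simp [h]
    · simp [PySem.Dict.getD_modify, h, Ne.symm h]

-- the items of the grouping fold, in key-first-occurrence order
theorem pv_build_items (list_files : List String) :
    (list_files.foldl (fun d f => d.modify (pvKey f) [] (fun v => v ++ [f])) PySem.Dict.empty).items
      = (PySem.List.dedup (list_files.map pvKey)).map
          (fun k => (k, list_files.filter (fun f => pvKey f == k))) := by
  have hnd : (list_files.foldl (fun d f => d.modify (pvKey f) [] (fun v => v ++ [f]))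
      PySem.Dict.empty).keys.Nodup :=
    PySem.Dict.nodup_keys_foldl_modify_key list_files pvKey [] (fun _ x v => v ++ [x])
      PySem.Dict.empty (by simp [PySem.Dict.keys_empty])
  have hkeys : (list_files.foldl (fun d f => d.modify (pvKey f) [] (fun v => v ++ [f]))
      PySem.Dict.empty).keys = PySem.List.dedup (list_files.map pvKey) := by
    rw [PySem.Dict.keys_foldl_modify_key list_files pvKey [] (fun _ x v => v ++ [x]) PySem.Dict.empty]
    simp [PySem.Dict.keys_empty, PySem.Set.update_nil_left]
  rw [PySem.Dict.items_eq_map_keys _ hnd [], hkeys]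
  refine List.map_congr_left (fun k _ => ?_)
  simp [pv_getD_fold]

-- ===== VERDICT (by name: the statement is the Claim_ definition above) =====
theorem generate_list_cap_spec : Claim_equal_generate_list_cap := by
  intro list_files _
  show generate_list_cap list_files = generate_list_cap_alt list_files
  have hstep : (fun (list_complet : PySem.Dict Int (List String)) (file_html : String) =>
      let init := ((PySem.Str.split? file_html "_").getD []).headD ""
      let number : Int :=
        if PySem.Str.strIsdigit init then
          let n := (PySem.Int.ofStr? init).getD 0
          (PySem.Int.ofStr? (String.ofList [(PySem.Int.toStr n).toList.headD '0'])).getD 0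
        else 0
      if list_complet.get? number = none then
        list_complet.insert number [file_html]
      else
        list_complet.modify number [] (fun v => v ++ [file_html]))
      = fun d f => d.modify (pvKey f) [] (fun v => v ++ [f]) := by
    funext d f
    exact pv_step_eq_modify d (pvKey f) f
  unfold generate_list_cap generate_list_cap_alt
  simp only [hstep, pv_build_items, List.map_map]
  rfl
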